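-- pv_equiv track=rewrite | github.com/ToyotaCRDL/rqrao | utils.py | get_2d_toric_graph
-- ===== SOURCE A (Python) =====
-- from typing import Tuple
--
-- def get_2d_toric_graph(
--     nb_grids: int,
--     extra: bool=False,
-- ) -> Tuple[Tuple[int, int]]:
--
--     edges = []
--     for i in range(nb_grids):
--         for j in range(nb_grids):
--             k = i * nb_grids + j
--             if j != nb_grids - 1:
--                 if not (k, k + 1) in edges:
--                     edges += [(k, k + 1)]
--             else:
--                 if not (k - nb_grids + 1, k) in edges:
--                     edges += [(k - nb_grids + 1, k)]
--             if i != nb_grids - 1: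
--                 if not (k, k + nb_grids) in edges:
--                     edges += [(k, k + nb_grids)]
--             else:
--                 if not (j, k) in edges:
--                     edges += [(j, k)]
--
--             if extra:
--                 edges += [(k, nb_grids * nb_grids)]
--
--     return tuple(sorted(edges))
-- ===== SOURCE B (Python) =====
-- def get_2d_toric_graph(
--     nb_grids: int,
--     extra: bool = False,
-- ):
--     # Vertex-major generation: visit linear vertex indices a = 0..n*n-1 in order and,
--     # for each, emit the normalized edges whose smaller endpoint is a (its torus
--     # neighbours b with a <= b, in increasing order), so the output is produced
--     # already sorted and deduplicated -- no global sort, no membership scans.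
--     n = nb_grids
--     if n <= 0:
--         return ()
--     out = []
--     for a in range(n * n):
--         i, j = divmod(a, n)
--         nbrs = {i * n + (j + 1) % n, i * n + (j - 1) % n,
--                 ((i + 1) % n) * n + j, ((i - 1) % n) * n + j}
--         out += [(a, b) for b in sorted(nbrs) if a <= b]
--         if extra:
--             out.append((a, n * n))
--     return tuple(out)
-- ===== Notes on version B (the rewrite author's own statement) =====
-- stated objective: faster
-- what changed: Instead of A's cell-by-cell branched edge emission with an O(E) list-membership dedup and a final global sort, B sweeps linear vertex indices a = 0..n*n-1 in increasing order and emits, for each a, the normalized edges whose smaller endpoint is a (its torus neighbours b with a <= b, in increasing order), so the output is generated already sorted and duplicate-free with no membership scans and no global sort; intended as faster (O(n^2) vs O(n^4)) - a timing run measured 99x at the largest size both versions finished (n=64), beyond which both exceed the harness timeout.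
import Mathlib
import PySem

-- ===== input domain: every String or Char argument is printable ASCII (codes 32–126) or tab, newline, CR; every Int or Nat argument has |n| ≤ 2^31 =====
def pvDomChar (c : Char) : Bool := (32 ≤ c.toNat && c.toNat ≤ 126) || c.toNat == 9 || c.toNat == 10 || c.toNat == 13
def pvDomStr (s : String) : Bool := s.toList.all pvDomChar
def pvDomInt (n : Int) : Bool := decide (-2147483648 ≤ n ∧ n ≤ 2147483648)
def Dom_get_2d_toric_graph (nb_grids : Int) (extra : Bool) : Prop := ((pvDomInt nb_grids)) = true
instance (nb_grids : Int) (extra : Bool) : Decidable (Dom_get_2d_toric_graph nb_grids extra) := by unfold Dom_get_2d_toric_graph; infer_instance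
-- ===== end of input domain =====

-- B replaces A's cell-by-cell branched emission + list-membership dedup + global sort by a
-- vertex-major sweep that emits each vertex's min-endpoint edges directly in sorted order;
-- objective: faster (intended O(n^2) vs O(n^4); a timing run measured 99x at the largest
-- size both versions finished, n=64).

-- ===== PORT A =====
def get_2d_toric_graph (nb_grids : Int) (extra : Bool) : List (Int × Int) :=
  let edges : List (Int × Int) :=
    (PySem.List.pyRange 0 nb_grids 1).foldl (fun edges i =>
      (PySem.List.pyRange 0 nb_grids 1).foldl (fun edges j =>
        let k := i * nb_grids + j
        let edges :=
          if j ≠ nb_grids - 1 then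
            (if (k, k + 1) ∉ edges then edges ++ [(k, k + 1)] else edges)
          else
            (if (k - nb_grids + 1, k) ∉ edges then edges ++ [(k - nb_grids + 1, k)] else edges)
        let edges :=
          if i ≠ nb_grids - 1 then
            (if (k, k + nb_grids) ∉ edges then edges ++ [(k, k + nb_grids)] else edges)
          else
            (if (j, k) ∉ edges then edges ++ [(j, k)] else edges)
        if extra then edges ++ [(k, nb_grids * nb_grids)] else edges) edges) []
  -- tuple(sorted(edges)) on pairs: Python's tuple-lexicographic sort
  PySem.List.sorted2 edges Prod.fst Prod.snd false

-- ===== PORT B =====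
def get_2d_toric_graph_alt (nb_grids : Int) (extra : Bool) : List (Int × Int) :=
  if nb_grids ≤ 0 then []
  else
    (PySem.List.pyRange 0 (nb_grids * nb_grids) 1).foldl (fun out a =>
      let i := PySem.Int.floordiv a nb_grids
      let j := PySem.Int.mod a nb_grids
      let nbrs : PySem.Set Int := PySem.Set.ofList
        [i * nb_grids + PySem.Int.mod (j + 1) nb_grids,
         i * nb_grids + PySem.Int.mod (j - 1) nb_grids,
         PySem.Int.mod (i + 1) nb_grids * nb_grids + j,
         PySem.Int.mod (i - 1) nb_grids * nb_grids + j]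
      let out := out ++
        ((PySem.List.sorted nbrs (fun x => x) false).filter (fun b => decide (a ≤ b))).map
          (fun b => (a, b))
      if extra then out ++ [(a, nb_grids * nb_grids)] else out) []

-- ===== PRECONDITION & SPEC =====
def Spec_get_2d_toric_graph (nb_grids : Int) (extra : Bool) (out : List (Int × Int)) : Prop := out = get_2d_toric_graph_alt nb_grids extra
instance (nb_grids : Int) (extra : Bool) (out : List (Int × Int)) : Decidable (Spec_get_2d_toric_graph nb_grids extra out) := by unfold Spec_get_2d_toric_graph; infer_instance

-- ===== CLAIM (what is proved, stated in full; the proofs are below) =====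
def Claim_equal_get_2d_toric_graph : Prop := ∀ (nb_grids : Int) (extra : Bool), Dom_get_2d_toric_graph nb_grids extra → Spec_get_2d_toric_graph nb_grids extra (get_2d_toric_graph nb_grids extra)

-- ===== LEMMAS AND PROOFS =====

-- lexicographic order on pairs (Python's tuple comparison), Prop and Bool forms
def lexle (x y : Int × Int) : Prop := x.1 < y.1 ∨ (x.1 = y.1 ∧ x.2 ≤ y.2)
def lexlt (x y : Int × Int) : Prop := x.1 < y.1 ∨ (x.1 = y.1 ∧ x.2 < y.2)
def ltB (x y : Int × Int) : Bool :=
  decide (x.1 < y.1) || (!decide (y.1 < x.1) && decide (x.2 < y.2))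

lemma ltB_false_iff (x y : Int × Int) : ltB x y = false ↔ lexle y x := by
  simp [ltB, lexle]; omega

lemma ltB_true_iff (x y : Int × Int) : ltB x y = true ↔ lexlt x y := by
  simp [ltB, lexlt]; omega

lemma lexle_trans {x y z : Int × Int} (h1 : lexle x y) (h2 : lexle y z) : lexle x z := by
  rcases h1 with h1 | ⟨h1, h1'⟩ <;> rcases h2 with h2 | ⟨h2, h2'⟩ <;>
    simp only [lexle] <;> omega

lemma insertBy_pairwise_lexle (x : Int × Int) (ys : List (Int × Int))
    (h : ys.Pairwise lexle) : (PySem.List.insertBy ltB x ys).Pairwise lexle := by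
  induction ys with
  | nil => simp [PySem.List.insertBy]
  | cons y t ih =>
    by_cases hxy : ltB x y = true
    · rw [show PySem.List.insertBy ltB x (y :: t) = x :: y :: t by
        simp [PySem.List.insertBy, hxy]]
      have hx : lexlt x y := (ltB_true_iff x y).mp hxy
      have hxle : lexle x y := by rcases hx with h' | ⟨h', h''⟩ <;> simp [lexle] <;> omega
      refine List.Pairwise.cons ?_ h
      intro z hz
      rcases List.mem_cons.mp hz with rfl | hz
      · exact hxle
      · exact lexle_trans hxle (List.rel_of_pairwise_cons h hz)
    · rw [show PySem.List.insertBy ltB x (y :: t) = y :: PySem.List.insertBy ltB x t by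
        simp [PySem.List.insertBy, hxy]]
      have hyx : lexle y x := (ltB_false_iff x y).mp (by revert hxy; cases ltB x y <;> simp)
      refine List.Pairwise.cons ?_ (ih h.of_cons)
      intro z hz
      rcases (PySem.List.mem_insertBy ltB x z t).mp hz with rfl | hz
      · exact hyx
      · exact List.rel_of_pairwise_cons h hz

lemma foldl_insertBy_pairwise_lexle (xs acc : List (Int × Int)) (h : acc.Pairwise lexle) :
    (xs.foldl (fun acc x => PySem.List.insertBy ltB x acc) acc).Pairwise lexle := by
  induction xs generalizing acc with
  | nil => exact h
  | cons x t ih => exact ih _ (insertBy_pairwise_lexle x acc h)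

lemma sorted2_pairwise_lexle (xs : List (Int × Int)) :
    (PySem.List.sorted2 xs Prod.fst Prod.snd false).Pairwise lexle := by
  have : PySem.List.sorted2 xs Prod.fst Prod.snd false =
      xs.foldl (fun acc x => PySem.List.insertBy ltB x acc) [] := rfl
  rw [this]
  exact foldl_insertBy_pairwise_lexle xs [] (by simp)

-- normalized edge tuple: tuple(sorted((a, b)))
def nEdge (a b : Int) : Int × Int := if a ≤ b then (a, b) else (b, a)

lemma nEdge_le {a b : Int} (h : a ≤ b) : nEdge a b = (a, b) := if_pos h

lemma nEdge_ge {a b : Int} (h : b ≤ a) : nEdge a b = (b, a) := by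
  unfold nEdge
  split_ifs with h'
  · have : a = b := le_antisymm h' h
    rw [this]
  · rfl

-- normalized horizontal / vertical edge of cell (i, j)
def hN (n i j : Int) : Int × Int := nEdge (i * n + j) (i * n + PySem.Int.mod (j + 1) n)
def vN (n i j : Int) : Int × Int := nEdge (i * n + j) (PySem.Int.mod (i + 1) n * n + j)

-- the edges A records at cell (i, j)
def Cell (n : Int) (extra : Bool) (i j : Int) (e : Int × Int) : Prop :=
  e = hN n i j ∨ e = vN n i j ∨ (extra = true ∧ e = (i * n + j, n * n))

-- all edges A records
def Efull (n : Int) (extra : Bool) (e : Int × Int) : Prop :=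
  ∃ i j, 0 ≤ i ∧ i < n ∧ 0 ≤ j ∧ j < n ∧ Cell n extra i j e

-- A's inner-loop body, named (definitionally the lambda in the port of A)
def stepA (n : Int) (extra : Bool) (i : Int) (edges : List (Int × Int)) (j : Int) : List (Int × Int) :=
  let k := i * n + j
  let edges :=
    if j ≠ n - 1 then
      (if (k, k + 1) ∉ edges then edges ++ [(k, k + 1)] else edges)
    else
      (if (k - n + 1, k) ∉ edges then edges ++ [(k - n + 1, k)] else edges)
  let edges :=
    if i ≠ n - 1 then
      (if (k, k + n) ∉ edges then edges ++ [(k, k + n)] else edges)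
    else
      (if (j, k) ∉ edges then edges ++ [(j, k)] else edges)
  if extra then edges ++ [(k, n * n)] else edges

lemma getA_eq (n : Int) (extra : Bool) :
    get_2d_toric_graph n extra =
      PySem.List.sorted2
        ((PySem.List.pyRange 0 n 1).foldl
          (fun edges i => (PySem.List.pyRange 0 n 1).foldl (stepA n extra i) edges) [])
        Prod.fst Prod.snd false := rfl

-- invariant: every edge recorded so far either stays inside the grid (snd < n*n)
-- or is a star edge of an earlier cell (fst < current linear cell index m)
def EdgeInv (n m : Int) (es : List (Int × Int)) : Prop :=
  ∀ e ∈ es, e.2 < n * n ∨ e.1 < m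

lemma idx_lt {n i j : Int} (hi : 0 ≤ i) (hi' : i < n) (hj : 0 ≤ j) (hj' : j < n) :
    i * n + j < n * n := by
  have h1 : i * n + j < (i + 1) * n := by nlinarith
  have h2 : (i + 1) * n ≤ n * n := by nlinarith
  linarith

lemma mod_small {a n : Int} (ha : 0 ≤ a) (h : a < n) : PySem.Int.mod a n = a := by
  rw [PySem.Int.mod_eq_emod_of_pos (by omega)]
  exact Int.emod_eq_of_lt ha h

lemma mod_self_eq {n : Int} (h : 0 < n) : PySem.Int.mod n n = 0 := by
  rw [PySem.Int.mod_eq_emod_of_pos h]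
  simp

lemma mod_neg_one {n : Int} (h : 0 < n) : PySem.Int.mod (-1) n = n - 1 := by
  rw [PySem.Int.mod_eq_emod_of_pos h]
  have h1 : (-1 : Int) = (n - 1) + n * (-1) := by ring
  rw [h1, Int.add_mul_emod_self_left]
  exact Int.emod_eq_of_lt (by omega) (by omega)

-- A's branched horizontal edge = the normalized modular edge hN
lemma hEdge_eq (n i j : Int) (hn : 0 < n) (hj : 0 ≤ j) (hj' : j < n) :
    (if j ≠ n - 1 then ((i * n + j, i * n + j + 1) : Int × Int)
     else (i * n + j - n + 1, i * n + j)) = hN n i j := by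
  unfold hN
  by_cases hjl : j = n - 1
  · have hm : PySem.Int.mod (j + 1) n = 0 := by
      rw [hjl, show n - 1 + 1 = n by ring]; exact mod_self_eq hn
    rw [hm, if_neg (not_not_intro hjl)]
    have h2 : i * n + 0 ≤ i * n + j := by omega
    rw [nEdge_ge h2]
    have h1 : i * n + j - n + 1 = i * n + 0 := by omega
    rw [h1]
  · have hm : PySem.Int.mod (j + 1) n = j + 1 := mod_small (by omega) (by omega)
    rw [hm, if_pos hjl]
    have h1 : i * n + (j + 1) = i * n + j + 1 := by ring
    rw [h1, nEdge_le (by omega)]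

-- A's branched vertical edge = the normalized modular edge vN
lemma vEdge_eq (n i j : Int) (hn : 0 < n) (hi : 0 ≤ i) (hi' : i < n) (hj : 0 ≤ j) :
    (if i ≠ n - 1 then ((i * n + j, i * n + j + n) : Int × Int) else (j, i * n + j)) = vN n i j := by
  unfold vN
  by_cases hil : i = n - 1
  · have hm : PySem.Int.mod (i + 1) n = 0 := by
      rw [hil, show n - 1 + 1 = n by ring]; exact mod_self_eq hn
    rw [hm, if_neg (not_not_intro hil), zero_mul, zero_add]
    have h2 : j ≤ i * n + j := by nlinarith
    rw [nEdge_ge h2]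
  · have hm : PySem.Int.mod (i + 1) n = i + 1 := mod_small (by omega) (by omega)
    rw [hm, if_pos hil]
    have h1 : (i + 1) * n + j = i * n + j + n := by ring
    rw [h1, nEdge_le (by omega)]

lemma hN_snd_lt (n i j : Int) (hi : 0 ≤ i) (hi' : i < n) (hj : 0 ≤ j) (hj' : j < n) :
    (hN n i j).2 < n * n := by
  rw [← hEdge_eq n i j (by omega) hj hj']
  by_cases hjl : j = n - 1
  · rw [if_neg (not_not_intro hjl)]
    exact idx_lt hi hi' hj hj'
  · rw [if_pos hjl]
    have := idx_lt hi hi' (show (0:Int) ≤ j + 1 by omega) (by omega)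
    show i * n + j + 1 < n * n
    linarith

lemma vN_snd_lt (n i j : Int) (hi : 0 ≤ i) (hi' : i < n) (hj : 0 ≤ j) (hj' : j < n) :
    (vN n i j).2 < n * n := by
  rw [← vEdge_eq n i j (by omega) hi hi' hj]
  by_cases hil : i = n - 1
  · rw [if_neg (not_not_intro hil)]
    exact idx_lt hi hi' hj hj'
  · rw [if_pos hil]
    have := idx_lt (show (0:Int) ≤ i + 1 by omega) (by omega) hj hj'
    show i * n + j + n < n * n
    nlinarith

-- the per-cell step: membership, nodup and the invariant
lemma stepA_char (n : Int) (extra : Bool) (i j : Int) (es : List (Int × Int))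
    (hi : 0 ≤ i) (hi' : i < n) (hj : 0 ≤ j) (hj' : j < n)
    (hInv : EdgeInv n (i * n + j) es) (hnd : es.Nodup) :
    (∀ e, e ∈ stepA n extra i es j ↔ e ∈ es ∨ Cell n extra i j e) ∧
      (stepA n extra i es j).Nodup ∧ EdgeInv n (i * n + j + 1) (stepA n extra i es j) := by
  have hn : 0 < n := by omega
  set k := i * n + j with hk
  set E1 := (if j ≠ n - 1 then ((k, k + 1) : Int × Int) else (k - n + 1, k)) with hE1def
  set E2 := (if i ≠ n - 1 then ((k, k + n) : Int × Int) else (j, k)) with hE2def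
  have hE1N : E1 = hN n i j := by
    rw [hE1def, hk]
    exact hEdge_eq n i j hn hj hj'
  have hE2N : E2 = vN n i j := by
    rw [hE2def, hk]
    exact vEdge_eq n i j hn hi hi' hj
  have habody : stepA n extra i es j =
      (let es1 := if E1 ∉ es then es ++ [E1] else es
       let es2 := if E2 ∉ es1 then es1 ++ [E2] else es1
       if extra then es2 ++ [(k, n * n)] else es2) := by
    by_cases hjl : j ≠ n - 1 <;> by_cases hil : i ≠ n - 1 <;>
      simp [stepA, hE1def, hE2def, hjl, hil, hk]
  set es1 := (if E1 ∉ es then es ++ [E1] else es) with hes1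
  set es2 := (if E2 ∉ es1 then es1 ++ [E2] else es1) with hes2
  have he1snd : E1.2 < n * n := by
    rw [hE1N]; exact hN_snd_lt n i j hi hi' hj hj'
  have he2snd : E2.2 < n * n := by
    rw [hE2N]; exact vN_snd_lt n i j hi hi' hj hj'
  have mem1 : ∀ e, e ∈ es1 ↔ e ∈ es ∨ e = E1 := by
    intro e
    rw [hes1]
    by_cases h : E1 ∈ es
    · rw [if_neg (not_not_intro h)]
      constructor
      · exact Or.inl
      · rintro (he | rfl)
        · exact he
        · exact h
    · rw [if_pos h]
      simp [List.mem_append]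
  have mem2 : ∀ e, e ∈ es2 ↔ e ∈ es ∨ e = E1 ∨ e = E2 := by
    intro e
    rw [hes2]
    by_cases h : E2 ∈ es1
    · rw [if_neg (not_not_intro h)]
      rw [mem1 e]
      constructor
      · tauto
      · rintro (he | rfl | rfl)
        · exact Or.inl he
        · exact Or.inr rfl
        · exact (mem1 _).mp h
    · rw [if_pos h]
      simp only [List.mem_append, List.mem_singleton, mem1]
      tauto
  have nd1 : es1.Nodup := by
    rw [hes1]
    by_cases h : E1 ∈ es
    · rw [if_neg (not_not_intro h)]; exact hnd
    · rw [if_pos h]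
      simp [List.nodup_append, hnd]
      exact fun a b hmem heq => h (heq ▸ hmem)
  have nd2 : es2.Nodup := by
    rw [hes2]
    by_cases h : E2 ∈ es1
    · rw [if_neg (not_not_intro h)]; exact nd1
    · rw [if_pos h]
      simp [List.nodup_append, nd1]
      exact fun a b hmem heq => h (heq ▸ hmem)
  have inv2 : ∀ e ∈ es2, e.2 < n * n ∨ e.1 < k := by
    intro e he
    rcases (mem2 e).mp he with he | rfl | rfl
    · exact hInv e he
    · exact Or.inl he1snd
    · exact Or.inl he2snd
  have hstar : ((k, n * n) : Int × Int) ∉ es2 := by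
    intro hx
    rcases inv2 _ hx with h | h
    · exact absurd h (lt_irrefl _)
    · exact absurd h (lt_irrefl _)
  refine ⟨?_, ?_, ?_⟩
  · intro e
    rw [habody]
    simp only [← hes1, ← hes2]
    cases extra
    · simp only [Bool.false_eq_true, if_false, mem2, Cell, ← hE1N, ← hE2N, ← hk]
      tauto
    · simp only [if_pos, List.mem_append, List.mem_singleton, mem2, Cell, ← hE1N, ← hE2N, ← hk]
      tauto
  · rw [habody]
    simp only [← hes1, ← hes2]
    cases extra
    · simpa using nd2
    · simp [List.nodup_append, nd2]
      exact fun a b hmem ha hb => hstar (by rw [← ha, ← hb]; exact hmem)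
  · rw [habody]
    simp only [← hes1, ← hes2]
    intro e he
    cases extra
    · simp only [Bool.false_eq_true, if_false] at he
      rcases inv2 e he with h | h
      · exact Or.inl h
      · exact Or.inr (by omega)
    · simp only [if_pos] at he
      rcases List.mem_append.mp he with h | h
      · rcases inv2 e h with h' | h'
        · exact Or.inl h'
        · exact Or.inr (by omega)
      · rw [List.mem_singleton] at h
        subst h
        exact Or.inr (by simp)

-- one row of A's loop
lemma rowA (n : Int) (extra : Bool) (i : Int) (hi : 0 ≤ i) (hi' : i < n) :
    ∀ (fuel : Nat) (jlo : Int) (es : List (Int × Int)),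
      (n - jlo).toNat = fuel → 0 ≤ jlo → jlo ≤ n → EdgeInv n (i * n + jlo) es → es.Nodup →
      (∀ e, e ∈ (PySem.List.pyRange jlo n 1).foldl (stepA n extra i) es ↔
          e ∈ es ∨ ∃ j, jlo ≤ j ∧ j < n ∧ Cell n extra i j e) ∧
        ((PySem.List.pyRange jlo n 1).foldl (stepA n extra i) es).Nodup ∧
        EdgeInv n (i * n + n) ((PySem.List.pyRange jlo n 1).foldl (stepA n extra i) es) := by
  intro fuel
  induction fuel with
  | zero =>
    intro jlo es hfuel h0 hle hInv hnd
    have hjn : jlo = n := by omega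
    subst hjn
    rw [PySem.List.pyRange_one_eq_nil le_rfl]
    refine ⟨fun e => ?_, hnd, hInv⟩
    simp only [List.foldl_nil]
    constructor
    · exact Or.inl
    · rintro (he | ⟨j, hj1, hj2, _⟩)
      · exact he
      · omega
  | succ m ih =>
    intro jlo es hfuel h0 hle hInv hnd
    have hlt : jlo < n := by omega
    rw [PySem.List.pyRange_one_cons hlt]
    simp only [List.foldl_cons]
    obtain ⟨hmem, hnd', hInv'⟩ := stepA_char n extra i jlo es hi hi' h0 hlt hInv hnd
    obtain ⟨hmem2, hnd2, hInv2⟩ := ih (jlo + 1) (stepA n extra i es jlo) (by omega) (by omega)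
      (by omega) (by rw [show i * n + (jlo + 1) = i * n + jlo + 1 by ring]; exact hInv') hnd'
    refine ⟨fun e => ?_, hnd2, hInv2⟩
    rw [hmem2 e]
    constructor
    · rintro (he | ⟨j, hj1, hj2, hc⟩)
      · rcases (hmem e).mp he with he | hc
        · exact Or.inl he
        · exact Or.inr ⟨jlo, le_rfl, hlt, hc⟩
      · exact Or.inr ⟨j, by omega, hj2, hc⟩
    · rintro (he | ⟨j, hj1, hj2, hc⟩)
      · exact Or.inl ((hmem e).mpr (Or.inl he))
      · by_cases hj : j = jlo
        · subst hj
          exact Or.inl ((hmem e).mpr (Or.inr hc))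
        · exact Or.inr ⟨j, by omega, hj2, hc⟩

-- all rows of A's loop
lemma gridA (n : Int) (extra : Bool) (hn : 0 < n) :
    ∀ (fuel : Nat) (ilo : Int) (es : List (Int × Int)),
      (n - ilo).toNat = fuel → 0 ≤ ilo → ilo ≤ n → EdgeInv n (ilo * n) es → es.Nodup →
      (∀ e, e ∈ (PySem.List.pyRange ilo n 1).foldl
            (fun edges i => (PySem.List.pyRange 0 n 1).foldl (stepA n extra i) edges) es ↔
          e ∈ es ∨ ∃ i j, ilo ≤ i ∧ i < n ∧ 0 ≤ j ∧ j < n ∧ Cell n extra i j e) ∧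
        ((PySem.List.pyRange ilo n 1).foldl
            (fun edges i => (PySem.List.pyRange 0 n 1).foldl (stepA n extra i) edges) es).Nodup := by
  intro fuel
  induction fuel with
  | zero =>
    intro ilo es hfuel h0 hle hInv hnd
    have hin : ilo = n := by omega
    subst hin
    rw [PySem.List.pyRange_one_eq_nil le_rfl]
    refine ⟨fun e => ?_, hnd⟩
    simp only [List.foldl_nil]
    constructor
    · exact Or.inl
    · rintro (he | ⟨i, j, hi1, hi2, _⟩)
      · exact he
      · omega
  | succ m ih =>
    intro ilo es hfuel h0 hle hInv hnd
    have hlt : ilo < n := by omega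
    rw [PySem.List.pyRange_one_cons hlt]
    simp only [List.foldl_cons]
    obtain ⟨hmem, hnd', hInv'⟩ := rowA n extra ilo h0 hlt (n - 0).toNat 0 es rfl le_rfl
      (by omega) (by rw [show ilo * n + 0 = ilo * n by ring]; exact hInv) hnd
    obtain ⟨hmem2, hnd2⟩ := ih (ilo + 1) _ (by omega) (by omega) (by omega)
      (by rw [show (ilo + 1) * n = ilo * n + n by ring]; exact hInv') hnd'
    refine ⟨fun e => ?_, hnd2⟩
    rw [hmem2 e]
    constructor
    · rintro (he | ⟨i, j, hi1, hi2, hj1, hj2, hc⟩)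
      · rcases (hmem e).mp he with he | ⟨j, hj1, hj2, hc⟩
        · exact Or.inl he
        · exact Or.inr ⟨ilo, j, le_rfl, hlt, hj1, hj2, hc⟩
      · exact Or.inr ⟨i, j, by omega, hi2, hj1, hj2, hc⟩
    · rintro (he | ⟨i, j, hi1, hi2, hj1, hj2, hc⟩)
      · exact Or.inl ((hmem e).mpr (Or.inl he))
      · by_cases hi : i = ilo
        · subst hi
          exact Or.inl ((hmem e).mpr (Or.inr ⟨j, hj1, hj2, hc⟩))
        · exact Or.inr ⟨i, j, by omega, hi2, hj1, hj2, hc⟩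

-- ===== B-side characterisation =====

def nbrsList (n a : Int) : List Int :=
  let i := PySem.Int.floordiv a n
  let j := PySem.Int.mod a n
  [i * n + PySem.Int.mod (j + 1) n, i * n + PySem.Int.mod (j - 1) n,
   PySem.Int.mod (i + 1) n * n + j, PySem.Int.mod (i - 1) n * n + j]

def blk (n : Int) (extra : Bool) (a : Int) : List (Int × Int) :=
  ((PySem.List.sorted (PySem.Set.ofList (nbrsList n a)) (fun x => x) false).filter
      (fun b => decide (a ≤ b))).map (fun b => (a, b)) ++
    (if extra then [(a, n * n)] else [])

lemma getB_eq (n : Int) (extra : Bool) (hn : ¬ n ≤ 0) :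
    get_2d_toric_graph_alt n extra = (PySem.List.pyRange 0 (n * n) 1).flatMap (blk n extra) := by
  unfold get_2d_toric_graph_alt
  rw [if_neg hn]
  have hbody : (fun (out : List (Int × Int)) (a : Int) =>
      let i := PySem.Int.floordiv a n
      let j := PySem.Int.mod a n
      let nbrs : PySem.Set Int := PySem.Set.ofList
        [i * n + PySem.Int.mod (j + 1) n, i * n + PySem.Int.mod (j - 1) n,
         PySem.Int.mod (i + 1) n * n + j, PySem.Int.mod (i - 1) n * n + j]
      let out := out ++
        ((PySem.List.sorted nbrs (fun x => x) false).filter (fun b => decide (a ≤ b))).map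
          (fun b => (a, b))
      if extra then out ++ [(a, n * n)] else out) =
      fun out a => out ++ blk n extra a := by
    funext out a
    cases extra <;> simp [blk, nbrsList, List.append_assoc]
  rw [hbody, PySem.List.foldl_append_eq_flatMap]
  simp

lemma blk_mem (n : Int) (extra : Bool) (a : Int) (e : Int × Int) :
    e ∈ blk n extra a ↔
      (∃ b, b ∈ nbrsList n a ∧ a ≤ b ∧ e = (a, b)) ∨ (extra = true ∧ e = (a, n * n)) := by
  unfold blk
  rw [List.mem_append, List.mem_map]
  constructor
  · rintro (⟨b, hb, rfl⟩ | h)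
    · have h2 := List.mem_filter.mp hb
      rw [PySem.List.mem_sorted, PySem.Set.mem_ofList] at h2
      exact Or.inl ⟨b, h2.1, by simpa using h2.2, rfl⟩
    · cases hx : extra
      · rw [hx] at h; simp at h
      · rw [hx] at h
        simp only [if_pos, List.mem_singleton] at h
        exact Or.inr ⟨rfl, h⟩
  · rintro (⟨b, hb, hab, rfl⟩ | ⟨hx, rfl⟩)
    · refine Or.inl ⟨b, ?_, rfl⟩
      rw [List.mem_filter, PySem.List.mem_sorted, PySem.Set.mem_ofList]
      exact ⟨hb, by simpa using hab⟩
    · rw [hx]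
      simp

lemma blk_fst (n : Int) (extra : Bool) (a : Int) (e : Int × Int) (he : e ∈ blk n extra a) :
    e.1 = a := by
  rcases (blk_mem n extra a e).mp he with ⟨b, _, _, rfl⟩ | ⟨_, rfl⟩ <;> rfl

-- index decomposition: 0 ≤ a < n*n splits as a = i*n + j with 0 ≤ i,j < n
lemma proj_idx (n i j : Int) (hn : 0 < n) (hj : 0 ≤ j) (hj' : j < n) :
    PySem.Int.floordiv (i * n + j) n = i ∧ PySem.Int.mod (i * n + j) n = j := by
  rw [PySem.Int.floordiv_eq_ediv_of_pos hn, PySem.Int.mod_eq_emod_of_pos hn]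
  constructor
  · rw [show i * n + j = j + i * n by ring, Int.add_mul_ediv_right _ _ (by omega : n ≠ 0),
      Int.ediv_eq_zero_of_lt hj hj']
    ring
  · rw [show i * n + j = j + n * i by ring, Int.add_mul_emod_self_left]
    exact Int.emod_eq_of_lt hj hj'

lemma nbrsList_decomp (n i j : Int) (hn : 0 < n) (hi : 0 ≤ i) (hi' : i < n)
    (hj : 0 ≤ j) (hj' : j < n) :
    nbrsList n (i * n + j) =
      [i * n + PySem.Int.mod (j + 1) n, i * n + PySem.Int.mod (j - 1) n,
       PySem.Int.mod (i + 1) n * n + j, PySem.Int.mod (i - 1) n * n + j] := by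
  obtain ⟨hdiv, hmod⟩ := proj_idx n i j hn hj hj'
  simp only [nbrsList, hdiv, hmod]

lemma nbrs_bounds (n i j : Int) (hn : 0 < n) (hi : 0 ≤ i) (hi' : i < n)
    (hj : 0 ≤ j) (hj' : j < n) :
    ∀ b ∈ nbrsList n (i * n + j), 0 ≤ b ∧ b < n * n := by
  rw [nbrsList_decomp n i j hn hi hi' hj hj']
  have m1 := PySem.Int.mod_nonneg (j + 1) hn
  have m2 := PySem.Int.mod_lt (j + 1) hn
  have m3 := PySem.Int.mod_nonneg (j - 1) hn
  have m4 := PySem.Int.mod_lt (j - 1) hn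
  have m5 := PySem.Int.mod_nonneg (i + 1) hn
  have m6 := PySem.Int.mod_lt (i + 1) hn
  have m7 := PySem.Int.mod_nonneg (i - 1) hn
  have m8 := PySem.Int.mod_lt (i - 1) hn
  intro b hb
  simp only [List.mem_cons, List.not_mem_nil, or_false] at hb
  rcases hb with rfl | rfl | rfl | rfl
  · exact ⟨by positivity, idx_lt hi hi' m1 m2⟩
  · exact ⟨by positivity, idx_lt hi hi' m3 m4⟩
  · exact ⟨by positivity, idx_lt m5 m6 hj hj'⟩
  · exact ⟨by positivity, idx_lt m7 m8 hj hj'⟩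

-- ===== the regrouping: A's per-cell edges = B's per-min-endpoint edges =====

lemma hN_of_ne (n i j : Int) (hn : 0 < n) (hj : 0 ≤ j) (hj' : j < n) (hne : j ≠ n - 1) :
    hN n i j = (i * n + j, i * n + j + 1) := by
  rw [← hEdge_eq n i j hn hj hj', if_pos hne]

lemma hN_last (n i : Int) (hn : 0 < n) :
    hN n i (n - 1) = (i * n, i * n + (n - 1)) := by
  unfold hN
  have hm : PySem.Int.mod (n - 1 + 1) n = 0 := by
    rw [show n - 1 + 1 = n by ring]; exact mod_self_eq hn
  rw [hm, nEdge_ge (by omega), show i * n + 0 = i * n by ring]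

lemma vN_of_ne (n i j : Int) (hn : 0 < n) (hi : 0 ≤ i) (hi' : i < n) (hne : i ≠ n - 1) :
    vN n i j = (i * n + j, i * n + j + n) := by
  unfold vN
  have hm : PySem.Int.mod (i + 1) n = i + 1 := mod_small (by omega) (by omega)
  rw [hm, show (i + 1) * n + j = i * n + j + n by ring, nEdge_le (by omega)]

lemma vN_last (n j : Int) (hn : 0 < n) (hj : 0 ≤ j) :
    vN n (n - 1) j = (j, (n - 1) * n + j) := by
  unfold vN
  have hm : PySem.Int.mod (n - 1 + 1) n = 0 := by
    rw [show n - 1 + 1 = n by ring]; exact mod_self_eq hn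
  rw [hm, zero_mul, zero_add, nEdge_ge (by nlinarith)]

-- grid edges: A's (i,j)-indexed normalized edges = B's min-endpoint-indexed edges
lemma regroup_grid (n : Int) (hn : 0 < n) (e : Int × Int) :
    (∃ i j, 0 ≤ i ∧ i < n ∧ 0 ≤ j ∧ j < n ∧ (e = hN n i j ∨ e = vN n i j)) ↔
      (∃ a, 0 ≤ a ∧ a < n * n ∧ ∃ b, b ∈ nbrsList n a ∧ a ≤ b ∧ e = (a, b)) := by
  constructor
  · rintro ⟨i, j, hi, hi', hj, hj', rfl | rfl⟩
    · by_cases hjl : j = n - 1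
      · subst hjl
        rw [hN_last n i hn]
        refine ⟨i * n, by positivity, by nlinarith, i * n + (n - 1), ?_, by omega, rfl⟩
        rw [show i * n = i * n + 0 by ring, nbrsList_decomp n i 0 hn hi hi' le_rfl hn]
        have hm2 : PySem.Int.mod ((0:Int) - 1) n = n - 1 := by
          rw [show (0:Int) - 1 = -1 by ring]; exact mod_neg_one hn
        simp only [List.mem_cons]
        exact Or.inr (Or.inl (by rw [hm2]; ring))
      · rw [hN_of_ne n i j hn hj hj' hjl]
        refine ⟨i * n + j, by positivity, idx_lt hi hi' hj hj', i * n + j + 1, ?_, by omega, rfl⟩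
        rw [nbrsList_decomp n i j hn hi hi' hj hj']
        have hm1 : PySem.Int.mod (j + 1) n = j + 1 := mod_small (by omega) (by omega)
        simp only [List.mem_cons]
        exact Or.inl (by rw [hm1]; ring)
    · by_cases hil : i = n - 1
      · subst hil
        rw [vN_last n j hn hj]
        refine ⟨j, hj, by nlinarith, (n - 1) * n + j, ?_, by nlinarith, rfl⟩
        rw [show j = 0 * n + j by ring, nbrsList_decomp n 0 j hn le_rfl hn hj hj']
        have hm2 : PySem.Int.mod ((0:Int) - 1) n = n - 1 := by
          rw [show (0:Int) - 1 = -1 by ring]; exact mod_neg_one hn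
        simp only [List.mem_cons]
        exact Or.inr (Or.inr (Or.inr (Or.inl (by rw [hm2]; ring))))
      · rw [vN_of_ne n i j hn hi hi' hil]
        refine ⟨i * n + j, by positivity, idx_lt hi hi' hj hj', i * n + j + n, ?_, by omega, rfl⟩
        rw [nbrsList_decomp n i j hn hi hi' hj hj']
        have hm3 : PySem.Int.mod (i + 1) n = i + 1 := mod_small (by omega) (by omega)
        simp only [List.mem_cons]
        exact Or.inr (Or.inr (Or.inl (by rw [hm3]; ring)))
  · rintro ⟨a, ha, ha', b, hb, hab, rfl⟩
    -- decompose a = i*n + j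
    obtain ⟨i, j, rfl, hi, hi', hj, hj'⟩ :
        ∃ i j, a = i * n + j ∧ 0 ≤ i ∧ i < n ∧ 0 ≤ j ∧ j < n := by
      refine ⟨a / n, a % n, ?_, Int.ediv_nonneg ha (by omega), ?_,
        Int.emod_nonneg a (by omega), Int.emod_lt_of_pos a hn⟩
      · rw [show a / n * n + a % n = n * (a / n) + a % n by ring, Int.ediv_add_emod]
      · exact (Int.ediv_lt_iff_lt_mul hn).mpr (by nlinarith)
    rw [nbrsList_decomp n i j hn hi hi' hj hj'] at hb
    simp only [List.mem_cons, List.not_mem_nil, or_false] at hb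
    rcases hb with rfl | rfl | rfl | rfl
    · -- right neighbour
      by_cases hjl : j = n - 1
      · subst hjl
        have hm : PySem.Int.mod (n - 1 + 1) n = 0 := by
          rw [show n - 1 + 1 = n by ring]; exact mod_self_eq hn
        rw [hm] at hab ⊢
        have hn1 : n = 1 := by omega
        subst hn1
        refine ⟨i, 1 - 1, hi, hi', by norm_num, by norm_num, Or.inl ?_⟩
        rw [hN_last 1 i one_pos]
        exact Prod.ext (by ring) (by ring)
      · have hm : PySem.Int.mod (j + 1) n = j + 1 := mod_small (by omega) (by omega)
        refine ⟨i, j, hi, hi', hj, hj', Or.inl ?_⟩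
        rw [hN_of_ne n i j hn hj hj' hjl, hm]
        simp [show i * n + (j + 1) = i * n + j + 1 by ring]
    · -- left neighbour
      by_cases hj0 : j = 0
      · subst hj0
        have hm : PySem.Int.mod ((0:Int) - 1) n = n - 1 := by
          rw [show (0:Int) - 1 = -1 by ring]; exact mod_neg_one hn
        rw [hm]
        refine ⟨i, n - 1, hi, hi', by omega, by omega, Or.inl ?_⟩
        rw [hN_last n i hn]
        exact Prod.ext (by ring) (by ring)
      · have hm : PySem.Int.mod (j - 1) n = j - 1 := mod_small (by omega) (by omega)
        rw [hm] at hab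
        omega
    · -- down neighbour
      by_cases hil : i = n - 1
      · subst hil
        have hm : PySem.Int.mod (n - 1 + 1) n = 0 := by
          rw [show n - 1 + 1 = n by ring]; exact mod_self_eq hn
        rw [hm, zero_mul, zero_add] at hab ⊢
        have h1 : 0 ≤ (n - 1) * n := mul_nonneg (by omega) (by omega)
        have hj0 : (n - 1) * n = 0 := by omega
        have hn1 : n = 1 := by rcases mul_eq_zero.mp hj0 with h | h <;> omega
        subst hn1
        refine ⟨1 - 1, j, by norm_num, by norm_num, hj, hj', Or.inr ?_⟩
        rw [vN_last 1 j one_pos hj]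
        exact Prod.ext (by ring) (by ring)
      · have hm : PySem.Int.mod (i + 1) n = i + 1 := mod_small (by omega) (by omega)
        refine ⟨i, j, hi, hi', hj, hj', Or.inr ?_⟩
        rw [vN_of_ne n i j hn hi hi' hil, hm]
        simp [show (i + 1) * n + j = i * n + j + n by ring]
    · -- up neighbour
      by_cases hi0 : i = 0
      · subst hi0
        have hm : PySem.Int.mod ((0:Int) - 1) n = n - 1 := by
          rw [show (0:Int) - 1 = -1 by ring]; exact mod_neg_one hn
        rw [hm]
        refine ⟨n - 1, j, by omega, by omega, hj, hj', Or.inr ?_⟩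
        rw [vN_last n j hn hj]
        exact Prod.ext (by ring) (by ring)
      · have hm : PySem.Int.mod (i - 1) n = i - 1 := mod_small (by omega) (by omega)
        rw [hm] at hab
        nlinarith

-- full regrouping including the star edges
lemma regroup (n : Int) (extra : Bool) (hn : 0 < n) (e : Int × Int) :
    Efull n extra e ↔
      ∃ a, 0 ≤ a ∧ a < n * n ∧
        ((∃ b, b ∈ nbrsList n a ∧ a ≤ b ∧ e = (a, b)) ∨ (extra = true ∧ e = (a, n * n))) := by
  constructor
  · rintro ⟨i, j, hi, hi', hj, hj', hc⟩
    rcases hc with hc | hc | ⟨hx, rfl⟩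
    · obtain ⟨a, ha, ha', hb⟩ := (regroup_grid n hn e).mp ⟨i, j, hi, hi', hj, hj', Or.inl hc⟩
      exact ⟨a, ha, ha', Or.inl hb⟩
    · obtain ⟨a, ha, ha', hb⟩ := (regroup_grid n hn e).mp ⟨i, j, hi, hi', hj, hj', Or.inr hc⟩
      exact ⟨a, ha, ha', Or.inl hb⟩
    · exact ⟨i * n + j, by positivity, idx_lt hi hi' hj hj', Or.inr ⟨hx, rfl⟩⟩
  · rintro ⟨a, ha, ha', hb | ⟨hx, rfl⟩⟩
    · obtain ⟨i, j, hi, hi', hj, hj', hc⟩ := (regroup_grid n hn e).mpr ⟨a, ha, ha', hb⟩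
      rcases hc with hc | hc
      · exact ⟨i, j, hi, hi', hj, hj', Or.inl hc⟩
      · exact ⟨i, j, hi, hi', hj, hj', Or.inr (Or.inl hc)⟩
    · obtain ⟨i, j, rfl, hi, hi', hj, hj'⟩ :
          ∃ i j, a = i * n + j ∧ 0 ≤ i ∧ i < n ∧ 0 ≤ j ∧ j < n := by
        refine ⟨a / n, a % n, ?_, Int.ediv_nonneg ha (by omega), ?_,
          Int.emod_nonneg a (by omega), Int.emod_lt_of_pos a hn⟩
        · rw [show a / n * n + a % n = n * (a / n) + a % n by ring, Int.ediv_add_emod]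
        · exact (Int.ediv_lt_iff_lt_mul hn).mpr (by nlinarith)
      exact ⟨i, j, hi, hi', hj, hj', Or.inr (Or.inr ⟨hx, rfl⟩)⟩

-- B's output is lexicographically strictly increasing
lemma blk_pairwise (n : Int) (extra : Bool) (a : Int) (hn : 0 < n)
    (ha : 0 ≤ a) (ha' : a < n * n) : (blk n extra a).Pairwise lexlt := by
  unfold blk
  rw [List.pairwise_append]
  refine ⟨?_, ?_, ?_⟩
  · rw [List.pairwise_map]
    have h1 : (PySem.List.sorted (PySem.Set.ofList (nbrsList n a)) (fun x => x) false).Pairwise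
        (· < ·) := PySem.List.sorted_ofList_pairwise_lt (nbrsList n a)
    have h2 : (List.filter (fun b => decide (a ≤ b))
        (PySem.List.sorted (PySem.Set.ofList (nbrsList n a)) (fun x => x) false)).Pairwise
        (· < ·) := List.Pairwise.sublist List.filter_sublist h1
    exact h2.imp (fun h => Or.inr ⟨rfl, h⟩)
  · cases extra <;> simp
  · intro x hx y hy
    obtain ⟨b, hb, rfl⟩ := List.mem_map.mp hx
    have hb' : b ∈ nbrsList n a := by
      have h2 := (List.mem_filter.mp hb).1
      rw [PySem.List.mem_sorted, PySem.Set.mem_ofList] at h2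
      exact h2
    cases extra
    · simp at hy
    · simp only [if_pos, List.mem_singleton] at hy
      subst hy
      -- b < n*n: grid neighbour is inside [0, n*n)
      obtain ⟨i, j, rfl, hi, hi', hj, hj'⟩ :
          ∃ i j, a = i * n + j ∧ 0 ≤ i ∧ i < n ∧ 0 ≤ j ∧ j < n := by
        refine ⟨a / n, a % n, ?_, Int.ediv_nonneg ha (by omega), ?_,
          Int.emod_nonneg a (by omega), Int.emod_lt_of_pos a hn⟩
        · rw [show a / n * n + a % n = n * (a / n) + a % n by ring, Int.ediv_add_emod]
        · exact (Int.ediv_lt_iff_lt_mul hn).mpr (by nlinarith)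
      have := (nbrs_bounds n i j hn hi hi' hj hj' b hb').2
      exact Or.inr ⟨rfl, this⟩

lemma pyRange_sq_pairwise (n : Int) (hn : 0 < n) :
    (PySem.List.pyRange 0 (n * n) 1).Pairwise (· < ·) := by
  have h : n * n = (((n * n).toNat : Nat) : Int) := by
    rw [Int.toNat_of_nonneg (by positivity)]
  rw [h, PySem.List.pyRange_zero_natCast]
  rw [List.pairwise_map]
  exact List.pairwise_lt_range.imp (by exact_mod_cast fun h => h)

lemma outB_pairwise (n : Int) (extra : Bool) (hn : 0 < n) :
    ((PySem.List.pyRange 0 (n * n) 1).flatMap (blk n extra)).Pairwise lexlt := by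
  rw [List.pairwise_flatMap]
  constructor
  · intro a ha
    rw [PySem.List.mem_pyRange_one] at ha
    exact blk_pairwise n extra a hn ha.1 ha.2
  · exact (pyRange_sq_pairwise n hn).imp (by
      intro a b hab
      intro x hx y hy
      refine Or.inl ?_
      rw [blk_fst n extra a x hx, blk_fst n extra b y hy]
      exact hab)

lemma lexlt_ne {x y : Int × Int} (h : lexlt x y) : x ≠ y := by
  rintro rfl
  rcases h with h | ⟨_, h⟩ <;> omega

lemma lexlt_le {x y : Int × Int} (h : lexlt x y) : lexle x y := by
  rcases h with h | ⟨h, h'⟩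
  · exact Or.inl h
  · exact Or.inr ⟨h, by omega⟩

lemma lexle_antisymm {x y : Int × Int} (h1 : lexle x y) (h2 : lexle y x) : x = y := by
  rcases h1 with h1 | ⟨h1, h1'⟩ <;> rcases h2 with h2 | ⟨h2, h2'⟩ <;>
    exact Prod.ext (by omega) (by omega)

-- ===== VERDICT (by name: the statement is the Claim_ definition above) =====
theorem get_2d_toric_graph_spec : Claim_equal_get_2d_toric_graph := by
  intro n extra _
  show get_2d_toric_graph n extra = get_2d_toric_graph_alt n extra
  by_cases hn : n ≤ 0
  · rw [getA_eq, PySem.List.pyRange_one_eq_nil hn]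
    unfold get_2d_toric_graph_alt
    rw [if_pos hn]
    rfl
  · have hn' : 0 < n := by omega
    rw [getA_eq, getB_eq n extra hn]
    set LA := (PySem.List.pyRange 0 n 1).foldl
      (fun edges i => (PySem.List.pyRange 0 n 1).foldl (stepA n extra i) edges) [] with hLA
    obtain ⟨hmemA, hndA⟩ := gridA n extra hn' (n - 0).toNat 0 [] rfl le_rfl (by omega)
      (by intro e he; simp at he) (by simp)
    set SA := PySem.List.sorted2 LA Prod.fst Prod.snd false with hSA
    set SB := (PySem.List.pyRange 0 (n * n) 1).flatMap (blk n extra) with hSB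
    have hpermA : SA.Perm LA := PySem.List.sorted2_perm LA Prod.fst Prod.snd false
    have hndSA : SA.Nodup := hpermA.nodup_iff.mpr hndA
    have hpwB : SB.Pairwise lexlt := outB_pairwise n extra hn'
    have hndSB : SB.Nodup := hpwB.imp lexlt_ne
    have hmemB : ∀ e, e ∈ SB ↔ Efull n extra e := by
      intro e
      rw [hSB, List.mem_flatMap]
      rw [regroup n extra hn' e]
      constructor
      · rintro ⟨a, ha, he⟩
        rw [PySem.List.mem_pyRange_one] at ha
        exact ⟨a, ha.1, ha.2, (blk_mem n extra a e).mp he⟩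
      · rintro ⟨a, ha, ha', hb⟩
        exact ⟨a, PySem.List.mem_pyRange_one.mpr ⟨ha, ha'⟩, (blk_mem n extra a e).mpr hb⟩
    have hperm : SA.Perm SB := by
      rw [List.perm_ext_iff_of_nodup hndSA hndSB]
      intro e
      rw [hpermA.mem_iff, hmemA e, hmemB e]
      constructor
      · rintro (he | ⟨i, j, hi1, hi2, hj1, hj2, hc⟩)
        · cases he
        · exact ⟨i, j, hi1, hi2, hj1, hj2, hc⟩
      · rintro ⟨i, j, hi1, hi2, hj1, hj2, hc⟩
        exact Or.inr ⟨i, j, hi1, hi2, hj1, hj2, hc⟩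
    exact List.Perm.eq_of_pairwise (fun a b _ _ h1 h2 => lexle_antisymm h1 h2)
      (sorted2_pairwise_lexle LA) (hpwB.imp lexlt_le) hperm
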